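-- pv_equiv track=rewrite | github.com/pepalonso/ludi-website | server/tournament/scheduler/generate_matches.py | group_teams_by_category_gender
-- ===== SOURCE A (Python) =====
-- from typing import Dict, List, Any
--
-- def group_teams_by_category_gender(teams: List[Dict]) -> Dict[str, List[Dict]]:
--     """Group teams by category and gender"""
--     groups = {}
--     for team in teams:
--         key = f"{team['category']}_{team['gender']}"
--         if key not in groups:
--             groups[key] = []
--         groups[key].append(team)
--     return groups
-- ===== SOURCE B (Python) =====
-- def group_teams_by_category_gender(teams):
--     """Group teams by category and gender"""
--     def key(t):
--         return f"{t['category']}_{t['gender']}"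
--     order = list(dict.fromkeys(map(key, teams)))
--     return {g: [t for t in teams if key(t) == g] for g in order}
-- ===== Notes on version B (the rewrite author's own statement) =====
-- stated objective: alternative
-- what changed: Replaces the single-pass dict accumulator with a two-phase plan: first compute the key sequence and its first-occurrence dedup (dict.fromkeys), then build each group by filtering the input list per key in a dict comprehension.
import Mathlib
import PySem

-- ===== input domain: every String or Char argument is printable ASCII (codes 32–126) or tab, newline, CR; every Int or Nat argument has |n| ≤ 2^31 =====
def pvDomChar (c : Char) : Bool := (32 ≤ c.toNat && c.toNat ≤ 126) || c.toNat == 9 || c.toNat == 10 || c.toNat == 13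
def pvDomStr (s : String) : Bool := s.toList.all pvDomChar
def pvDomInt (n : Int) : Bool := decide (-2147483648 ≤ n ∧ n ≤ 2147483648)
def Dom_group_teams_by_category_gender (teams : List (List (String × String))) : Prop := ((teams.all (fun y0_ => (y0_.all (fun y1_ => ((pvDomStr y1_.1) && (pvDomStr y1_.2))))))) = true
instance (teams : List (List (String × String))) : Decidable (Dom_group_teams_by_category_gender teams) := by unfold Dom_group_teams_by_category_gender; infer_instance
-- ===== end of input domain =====

-- B is an alternative decomposition (first-occurrence key order + one filter per key) with the same result; no speed claim.

-- ===== PORT A =====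
-- the f-string f"{team['category']}_{team['gender']}"; exact on Pre_ (both keys present — Python raises KeyError otherwise)
def pvKeyOf (team : List (String × String)) : String :=
  ((PySem.Dict.mk team).getD "category" "") ++ "_" ++ ((PySem.Dict.mk team).getD "gender" "")

def group_teams_by_category_gender (teams : List (List (String × String))) : List (String × List (List (String × String))) :=
  (teams.foldl (fun groups team =>
      let key := pvKeyOf team
      let groups := if groups.contains key then groups else groups.insert key []
      groups.modify key [] (fun l => l ++ [team]))
    PySem.Dict.empty).items

-- ===== PORT B =====
def group_teams_by_category_gender_alt (teams : List (List (String × String))) : List (String × List (List (String × String))) :=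
  let order := PySem.List.dedup (teams.map pvKeyOf)
  order.map (fun g => (g, teams.filter (fun t => pvKeyOf t == g)))

-- ===== PRECONDITION & SPEC =====
-- Pre_ excludes exactly the teams missing a 'category' or 'gender' key, on which Python A raises KeyError.
def Pre_group_teams_by_category_gender (teams : List (List (String × String))) : Prop :=
  (teams.all (fun t => (PySem.Dict.mk t).contains "category" && (PySem.Dict.mk t).contains "gender")) = true
instance (teams : List (List (String × String))) : Decidable (Pre_group_teams_by_category_gender teams) := by unfold Pre_group_teams_by_category_gender; infer_instance

def pvWitness_group_teams_by_category_gender : (List (List (String × String))) :=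
  [[("category", "U12"), ("gender", "M")], [("category", "U12"), ("gender", "F")], [("category", "U12"), ("gender", "M")]]

def Spec_group_teams_by_category_gender (teams : List (List (String × String))) (out : List (String × List (List (String × String)))) : Prop := out = group_teams_by_category_gender_alt teams
instance (teams : List (List (String × String))) (out : List (String × List (List (String × String)))) : Decidable (Spec_group_teams_by_category_gender teams out) := by unfold Spec_group_teams_by_category_gender; infer_instance

-- ===== CLAIM (what is proved, stated in full; the proofs are below) =====
def Claim_equal_group_teams_by_category_gender : Prop := ∀ (teams : List (List (String × String))), Dom_group_teams_by_category_gender teams → Pre_group_teams_by_category_gender teams → Spec_group_teams_by_category_gender teams (group_teams_by_category_gender teams)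

-- ===== LEMMAS AND PROOFS =====

-- A's body (if-absent-insert-[], then append) is the same dict step as a single modify.
theorem stepA_eq_modify (d : PySem.Dict String (List (List (String × String)))) (k : String) (t : List (String × String)) :
    (if d.contains k then d else d.insert k []).modify k [] (fun l => l ++ [t]) = d.modify k [] (fun l => l ++ [t]) := by
  by_cases h : d.contains k = true
  · simp [h]
  · simp only [h]
    simp [PySem.Dict.modify, PySem.Dict.getD_insert_self, PySem.Dict.insert_insert_self,
      PySem.Dict.getD_of_not_contains d ([] : List (List (String × String))) (by simpa using h)]

theorem foldA_eq (teams : List (List (String × String))) :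
    (teams.foldl (fun groups team =>
        let key := pvKeyOf team
        let groups := if groups.contains key then groups else groups.insert key []
        groups.modify key [] (fun l => l ++ [team]))
      PySem.Dict.empty)
    = teams.foldl (fun d t => d.modify (pvKeyOf t) [] (fun l => l ++ [t])) PySem.Dict.empty := by
  have hstep : (fun (groups : PySem.Dict String (List (List (String × String)))) team =>
      let key := pvKeyOf team
      let groups := if groups.contains key then groups else groups.insert key []
      groups.modify key [] (fun l => l ++ [team]))
    = (fun d t => d.modify (pvKeyOf t) [] (fun l => l ++ [t])) := by
    funext d t
    exact stepA_eq_modify d (pvKeyOf t) t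
  rw [hstep]

theorem getD_foldA (teams : List (List (String × String))) (c : String) :
    (teams.foldl (fun d t => d.modify (pvKeyOf t) [] (fun l => l ++ [t])) PySem.Dict.empty).getD c []
    = teams.filter (fun t => pvKeyOf t == c) := by
  have h := PySem.Dict.getD_foldl_modify_append (teams.map (fun t => (pvKeyOf t, t))) PySem.Dict.empty c
  rw [List.foldl_map] at h
  simpa [List.filter_map, List.map_map, Function.comp_def] using h

theorem keys_foldA (teams : List (List (String × String))) :
    (teams.foldl (fun d t => d.modify (pvKeyOf t) [] (fun l => l ++ [t])) PySem.Dict.empty).keys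
    = PySem.Set.ofList (teams.map pvKeyOf) := by
  have h := PySem.Dict.keys_foldl_modify_key teams pvKeyOf ([] : List (List (String × String)))
      (fun _ t => fun l => l ++ [t]) PySem.Dict.empty
  simpa [PySem.Dict.keys_empty, PySem.Set.update, PySem.Set.ofList] using h

-- ===== VERDICT (by name: the statement is the Claim_ definition above) =====
theorem group_teams_by_category_gender_spec : Claim_equal_group_teams_by_category_gender := by
  intro teams _ _
  unfold Spec_group_teams_by_category_gender group_teams_by_category_gender group_teams_by_category_gender_alt
  rw [foldA_eq]
  have hk := keys_foldA teams
  have hnd : (teams.foldl (fun d t => d.modify (pvKeyOf t) [] (fun l => l ++ [t])) PySem.Dict.empty).keys.Nodup := by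
    have := PySem.Dict.nodup_keys_foldl_modify_key teams pvKeyOf ([] : List (List (String × String)))
      (fun _ t => fun l => l ++ [t]) PySem.Dict.empty (by simp [PySem.Dict.keys_empty])
    exact this
  rw [PySem.Dict.items_eq_map_keys _ hnd []]
  rw [hk]
  simp only [PySem.List.dedup_eq_ofList]
  exact List.map_congr_left (fun g _ => by rw [getD_foldA])
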